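-- pv_equiv track=rewrite | github.com/Efinix-Inc/sapphire-soc-dt-generator | core/core.py | get_memory_config
-- ===== SOURCE A (Python) =====
-- def get_value(prop):
--     # remove tail character
--     prop = prop.rstrip('\n')
--     props = prop.split()
--
--     return props[len(props) -1]
--
-- def __get_peripheral_properties(cfg, peripheral, exclude_properties="", exclude=False):
--     props = []
--
--     for line in cfg:
--         if exclude:
--             if exclude_properties in line:
--                 continue
--
--         if peripheral in line:
--             props.append(line)
--
--     return props
--
-- def get_peripheral_properties(cfg, peripheral):
--     return __get_peripheral_properties(cfg, peripheral,
--                                         exclude_properties="",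
--                                         exclude=False)
--
-- def __get_property_value(cfg, peripheral, name, match=False, exclude=False):
--     value = ''
--     props = get_peripheral_properties(cfg, peripheral)
--
--     if exclude:
--         for prop in props:
--             if name in prop:
--                 props.remove(prop)
--
--         name = peripheral
--
--     for prop in props:
--         if match:
--             prop_name = prop.split()[1]
--             if name == prop_name:
--                 value = get_value(prop)
--
--         else:
--             if name in prop:
--                 value = get_value(prop)
--
--     return value
--
-- def get_property_value(cfg, peripheral, name):
--     return  __get_property_value(cfg, peripheral, name, match=False)
--
-- def get_property_value_match(cfg, peripheral, name):
--     return __get_property_value(cfg, peripheral, name, match=True)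
--
-- def get_memory_config(cfg):
--     memory_types = ['external_memory', 'internal_memory']
--     mem_node = {"memory": {}}
--
--     for i, keyword in enumerate(['SYSTEM_DDR_BMB', 'RAM_A']):
--         size = get_property_value(cfg, keyword, 'SIZE ')
--         addr = get_property_value(cfg, keyword, 'CTRL ')
--         if not addr:
--             addr = get_property_value_match(cfg, keyword, keyword)
--
--         mem_type = memory_types[i]
--         memory_node = {
--             "label": "{}".format(mem_type),
--             "name": "memory",
--             "addr": addr.lstrip('0x'),
--             "size": size,
--             "device_type": "memory"
--         }
--
--         mem_node['memory'][mem_type] = memory_node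
--
--     return mem_node
-- ===== SOURCE B (Python) =====
-- def get_memory_config(cfg):
--     keywords = ('SYSTEM_DDR_BMB', 'RAM_A')
--     # single backward pass: first hit from the end wins (= last match), all six
--     # values collected in one traversal instead of re-scanning cfg per field
--     found = {}
--     for line in reversed(cfg):
--         toks = line.rstrip('\n').split()
--         for k in keywords:
--             if k in line:
--                 if 'SIZE ' in line:
--                     found.setdefault((k, 'size'), toks[-1])
--                 if 'CTRL ' in line:
--                     found.setdefault((k, 'ctrl'), toks[-1])
--                 if len(toks) > 1 and toks[1] == k:
--                     found.setdefault((k, 'fallback'), toks[-1])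
--     mem = {}
--     for mem_type, k in zip(('external_memory', 'internal_memory'), keywords):
--         addr = found.get((k, 'ctrl'), found.get((k, 'fallback'), ''))
--         mem[mem_type] = {
--             "label": mem_type,
--             "name": "memory",
--             "addr": addr.lstrip('0x'),
--             "size": found.get((k, 'size'), ''),
--             "device_type": "memory",
--         }
--     return {"memory": mem}
-- ===== Notes on version B (the rewrite author's own statement) =====
-- stated objective: alternative
-- what changed: B makes ONE backward pass over cfg, collecting first-hit-from-the-end values for all six (keyword, field) slots into a setdefault dict, instead of A's six separate forward scans of cfg (helper-chain filter plus last-match-wins overwrite loop per field).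
import Mathlib
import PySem

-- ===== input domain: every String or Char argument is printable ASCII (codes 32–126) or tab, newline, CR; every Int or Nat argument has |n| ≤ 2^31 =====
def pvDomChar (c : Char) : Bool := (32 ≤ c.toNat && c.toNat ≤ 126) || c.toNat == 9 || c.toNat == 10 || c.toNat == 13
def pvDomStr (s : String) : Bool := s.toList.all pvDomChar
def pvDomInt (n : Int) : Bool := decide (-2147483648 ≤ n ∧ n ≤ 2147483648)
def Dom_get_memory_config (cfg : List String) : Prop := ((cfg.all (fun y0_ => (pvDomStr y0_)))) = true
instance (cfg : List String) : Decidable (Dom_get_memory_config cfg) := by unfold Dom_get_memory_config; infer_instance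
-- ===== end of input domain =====

-- B replaces A's six forward re-scans of cfg (helper chain, last-match-wins overwrite loops) by ONE backward pass over cfg
-- that collects all six first-from-the-end values into a setdefault dict, then assembles the nodes from that dict.

-- ===== PORT A =====
-- shared exact port of Python's .rstrip('\n') on code points (no PySem primitive takes a char set)
def pvRstripNl (cs : List Char) : List Char := (cs.reverse.dropWhile (· == '\n')).reverse

-- get_value: props[len(props)-1]; the empty-props IndexError is excluded by Pre_, where pyGetD is exact
def pvGetValue (prop : String) : String :=
  let props := PySem.Str.split₀ (String.ofList (pvRstripNl prop.toList))
  PySem.List.pyGetD props (PySem.List.len props - 1) ""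

-- __get_peripheral_properties / get_peripheral_properties (exclude=False: that dead branch is never taken in this module)
def pvGetPeripheralProperties (cfg : List String) (peripheral : String) : List String :=
  cfg.foldl (fun props line => if PySem.Str.isIn peripheral line then props ++ [line] else props) []

-- __get_property_value (exclude=False always here); prop.split()[1]'s IndexError (fewer than 2 tokens on the
-- match path) is excluded by Pre_, where pyGetD with default "" is exact
def pvGetPropertyValue (cfg : List String) (peripheral name : String) (mtch : Bool) : String :=
  let props := pvGetPeripheralProperties cfg peripheral
  props.foldl (fun value prop =>
    if mtch then
      if name == PySem.List.pyGetD (PySem.Str.split₀ prop) 1 "" then pvGetValue prop else value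
    else
      if PySem.Str.isIn name prop then pvGetValue prop else value) ""

def get_memory_config (cfg : List String) : List (String × List (String × List (String × String))) :=
  let memoryTypes := ["external_memory", "internal_memory"]
  let inner := (PySem.List.enumerate ["SYSTEM_DDR_BMB", "RAM_A"]).foldl (fun acc p =>
    let keyword := p.2
    let size := pvGetPropertyValue cfg keyword "SIZE " false
    let addr0 := pvGetPropertyValue cfg keyword "CTRL " false
    let addr := if addr0 == "" then pvGetPropertyValue cfg keyword keyword true else addr0
    let memType := PySem.List.pyGetD memoryTypes p.1 ""
    acc ++ [(memType, [("label", memType), ("name", "memory"),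
      ("addr", String.ofList (addr.toList.dropWhile (fun c => c == '0' || c == 'x'))),
      ("size", size), ("device_type", "memory")])]) []
  [("memory", inner)]

-- ===== PORT B =====
-- body of B's inner 'for k in keywords' loop: conditionally setdefault the three (k, field) slots from this line.
-- toks[-1] is exact via pyGetD since each guard ('SIZE ' in line, 'CTRL ' in line, len(toks) > 1) forces toks ≠ [].
def pvStepK (line : String) (toks : List String) (d : PySem.Dict (String × String) String)
    (k : String) : PySem.Dict (String × String) String :=
  if PySem.Str.isIn k line then
    let d1 := if PySem.Str.isIn "SIZE " line then d.setdefault (k, "size") (PySem.List.pyGetD toks (-1) "") else d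
    let d2 := if PySem.Str.isIn "CTRL " line then d1.setdefault (k, "ctrl") (PySem.List.pyGetD toks (-1) "") else d1
    if decide (1 < PySem.List.len toks) && (PySem.List.pyGetD toks 1 "" == k) then
      d2.setdefault (k, "fallback") (PySem.List.pyGetD toks (-1) "")
    else d2
  else d

-- body of B's 'for line in reversed(cfg)' loop
def pvStep (found : PySem.Dict (String × String) String) (line : String) :
    PySem.Dict (String × String) String :=
  (["SYSTEM_DDR_BMB", "RAM_A"] : List String).foldl
    (pvStepK line (PySem.Str.split₀ (String.ofList (pvRstripNl line.toList)))) found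

def get_memory_config_alt (cfg : List String) : List (String × List (String × List (String × String))) :=
  let keywords : List String := ["SYSTEM_DDR_BMB", "RAM_A"]
  let found := cfg.reverse.foldl pvStep PySem.Dict.empty
  let inner := (List.zip ["external_memory", "internal_memory"] keywords).map (fun p =>
    let memType := p.1
    let k := p.2
    let addr := found.getD (k, "ctrl") (found.getD (k, "fallback") "")
    (memType, [("label", memType), ("name", "memory"),
      ("addr", String.ofList (addr.toList.dropWhile (fun c => c == '0' || c == 'x'))),
      ("size", found.getD (k, "size") ""), ("device_type", "memory")]))
  [("memory", inner)]

-- ===== PRECONDITION & SPEC =====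
-- Pre_ excludes exactly the inputs where Python A raises IndexError: when a keyword has no line containing
-- 'CTRL ', A reads split()[1] of every line containing that keyword, so every such line needs ≥ 2 tokens.
def Pre_get_memory_config (cfg : List String) : Prop :=
  ∀ k ∈ (["SYSTEM_DDR_BMB", "RAM_A"] : List String),
    (¬ ∃ l ∈ cfg, PySem.Str.isIn k l = true ∧ PySem.Str.isIn "CTRL " l = true) →
      ∀ l ∈ cfg, PySem.Str.isIn k l = true → 2 ≤ (PySem.Str.split₀ l).length
instance (cfg : List String) : Decidable (Pre_get_memory_config cfg) := by unfold Pre_get_memory_config; infer_instance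

def pvWitness_get_memory_config : List String :=
  ["SYSTEM_DDR_BMB SIZE 0x2000", "SYSTEM_DDR_BMB CTRL 0x00f00000"]

def Spec_get_memory_config (cfg : List String) (out : List (String × List (String × List (String × String)))) : Prop := out = get_memory_config_alt cfg
instance (cfg : List String) (out : List (String × List (String × List (String × String)))) : Decidable (Spec_get_memory_config cfg out) := by unfold Spec_get_memory_config; infer_instance

-- ===== CLAIM (what is proved, stated in full; the proofs are below) =====
def Claim_equal_get_memory_config : Prop := ∀ (cfg : List String), Dom_get_memory_config cfg → Pre_get_memory_config cfg → Spec_get_memory_config cfg (get_memory_config cfg)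

-- ===== LEMMAS AND PROOFS =====

-- proof-side name for "last whitespace token of the '\n'-stripped line", the value every slot stores
def pvLastTok (line : String) : String :=
  PySem.List.pyGetD (PySem.Str.split₀ (String.ofList (pvRstripNl line.toList))) (-1) ""

theorem pv_mem_dropWhile_of_ne {α : Type} (p : α → Bool) (l : List α) (c : α)
    (hc : c ∈ l) (hp : p c = false) : c ∈ l.dropWhile p := by
  induction l with
  | nil => cases hc
  | cons x t ih =>
    by_cases hx : p x = true
    · rw [List.dropWhile_cons_of_pos hx]
      rcases List.mem_cons.mp hc with rfl | hc
      · rw [hx] at hp; cases hp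
      · exact ih hc
    · rw [List.dropWhile_cons_of_neg hx]
      exact hc

theorem pv_mem_rstripNl (cs : List Char) (c : Char) (hc : c ∈ cs) (hne : c ≠ '\n') :
    c ∈ pvRstripNl cs := by
  unfold pvRstripNl
  rw [List.mem_reverse]
  exact pv_mem_dropWhile_of_ne _ _ _ (List.mem_reverse.mpr hc) (by simp [hne])

-- every piece of split() is a nonempty token
theorem pv_go_pieces (s : List Char) : ∀ (cur : List Char) (acc : List (List Char)),
    (∀ p ∈ acc, p ≠ []) → ∀ p ∈ PySem.Chars.split₀.go s cur acc, p ≠ [] := by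
  induction s with
  | nil =>
    intro cur acc hacc p hp
    rw [PySem.Chars.split₀.go] at hp
    by_cases hc : cur.isEmpty
    · rw [if_pos hc] at hp; exact hacc p (List.mem_reverse.mp hp)
    · rw [if_neg hc] at hp
      rcases List.mem_cons.mp (List.mem_reverse.mp hp) with rfl | hm
      · simp [List.isEmpty_iff] at hc; simp [hc]
      · exact hacc p hm
  | cons c rest ih =>
    intro cur acc hacc p hp
    rw [PySem.Chars.split₀.go] at hp
    by_cases hs : PySem.Chars.isspace c
    · rw [if_pos hs] at hp
      by_cases hc : cur.isEmpty
      · rw [if_pos hc] at hp; exact ih [] acc hacc p hp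
      · rw [if_neg hc] at hp
        refine ih [] _ ?_ p hp
        intro q hq
        rcases List.mem_cons.mp hq with rfl | hm
        · simp [List.isEmpty_iff] at hc; simp [hc]
        · exact hacc q hm
    · rw [if_neg hs] at hp
      exact ih (c :: cur) acc hacc p hp

theorem pv_go_ne_nil (s : List Char) : ∀ (cur : List Char) (acc : List (List Char)),
    (acc ≠ [] ∨ cur ≠ [] ∨ ∃ c ∈ s, PySem.Chars.isspace c = false) →
    PySem.Chars.split₀.go s cur acc ≠ [] := by
  induction s with
  | nil =>
    intro cur acc h
    rw [PySem.Chars.split₀.go]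
    rcases h with h | h | ⟨c, hc, _⟩
    · by_cases hc : cur.isEmpty <;> simp [hc, h]
    · rw [if_neg (by simp [List.isEmpty_iff, h])]; simp
    · cases hc
  | cons c rest ih =>
    intro cur acc h
    rw [PySem.Chars.split₀.go]
    by_cases hs : PySem.Chars.isspace c
    · rw [if_pos hs]
      by_cases hc : cur.isEmpty
      · rw [if_pos hc]
        refine ih [] acc ?_
        rcases h with h | h | ⟨d, hd, hdn⟩
        · exact Or.inl h
        · simp [List.isEmpty_iff] at hc; cases h hc
        · rcases List.mem_cons.mp hd with rfl | hm
          · rw [hs] at hdn; cases hdn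
          · exact Or.inr (Or.inr ⟨d, hm, hdn⟩)
      · rw [if_neg hc]
        exact ih [] _ (Or.inl (by simp))
    · rw [if_neg hs]
      exact ih (c :: cur) acc (Or.inr (Or.inl (by simp)))

theorem pv_piece_ne_nil (cs : List Char) (p : List Char) (hp : p ∈ PySem.Chars.split₀ cs) : p ≠ [] := by
  rw [PySem.Chars.split₀] at hp
  exact pv_go_pieces cs [] [] (by simp) p hp

theorem pv_split₀_ne_nil (cs : List Char) (c : Char) (hc : c ∈ cs)
    (hsp : PySem.Chars.isspace c = false) : PySem.Chars.split₀ cs ≠ [] := by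
  rw [PySem.Chars.split₀]
  exact pv_go_ne_nil cs [] [] (Or.inr (Or.inr ⟨c, hc, hsp⟩))

-- split₀ ignores a trailing run of whitespace: go over all-space input only flushes
theorem pv_go_allspace (ws : List Char) (hws : ∀ c ∈ ws, PySem.Chars.isspace c = true) :
    ∀ (cur : List Char) (acc : List (List Char)),
      PySem.Chars.split₀.go ws cur acc = PySem.Chars.split₀.go [] cur acc := by
  have gnil : ∀ (cur : List Char) (acc : List (List Char)),
      PySem.Chars.split₀.go [] cur acc
        = if cur.isEmpty then acc.reverse else (cur.reverse :: acc).reverse := by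
    intro cur acc; rw [PySem.Chars.split₀.go]
  induction ws with
  | nil => intro cur acc; rfl
  | cons w ws ih =>
    intro cur acc
    have hw : PySem.Chars.isspace w = true := hws w (by simp)
    have hws' : ∀ c ∈ ws, PySem.Chars.isspace c = true := fun c hc => hws c (by simp [hc])
    conv_lhs => rw [PySem.Chars.split₀.go]
    rw [if_pos hw]
    by_cases hc : cur.isEmpty
    · rw [if_pos hc, ih hws' [] acc, gnil, gnil, if_pos hc]
      simp
    · rw [if_neg hc, ih hws' [] _, gnil, gnil, if_neg hc]
      simp

theorem pv_go_append_space (s ws : List Char) (hws : ∀ c ∈ ws, PySem.Chars.isspace c = true) :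
    ∀ (cur : List Char) (acc : List (List Char)),
      PySem.Chars.split₀.go (s ++ ws) cur acc = PySem.Chars.split₀.go s cur acc := by
  induction s with
  | nil =>
    intro cur acc
    rw [List.nil_append, pv_go_allspace ws hws]
  | cons c rest ih =>
    intro cur acc
    rw [List.cons_append, PySem.Chars.split₀.go]
    conv_rhs => rw [PySem.Chars.split₀.go]
    by_cases hs : PySem.Chars.isspace c
    · rw [if_pos hs, if_pos hs]
      by_cases hc : cur.isEmpty
      · rw [if_pos hc, if_pos hc, ih]
      · rw [if_neg hc, if_neg hc, ih]
    · rw [if_neg hs, if_neg hs, ih]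

theorem pv_chars_split_rstrip (cs : List Char) :
    PySem.Chars.split₀ (pvRstripNl cs) = PySem.Chars.split₀ cs := by
  have hdecomp : pvRstripNl cs ++ (cs.reverse.takeWhile (· == '\n')).reverse = cs := by
    unfold pvRstripNl
    rw [← List.reverse_append, List.takeWhile_append_dropWhile, List.reverse_reverse]
  have hws : ∀ c ∈ (cs.reverse.takeWhile (· == '\n')).reverse, PySem.Chars.isspace c = true := by
    intro c hc
    have := List.mem_takeWhile_imp (List.mem_reverse.mp hc)
    have hc' : c = '\n' := by simpa using this
    subst hc'; decide
  conv_rhs => rw [← hdecomp]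
  rw [PySem.Chars.split₀, PySem.Chars.split₀, pv_go_append_space _ _ hws]

theorem pv_str_split_rstrip (l : String) :
    PySem.Str.split₀ (String.ofList (pvRstripNl l.toList)) = PySem.Str.split₀ l := by
  rw [PySem.Str.split₀, PySem.Str.split₀]
  have htl : (String.ofList (pvRstripNl l.toList)).toList = pvRstripNl l.toList := by simp
  rw [htl, pv_chars_split_rstrip]

-- pyGetD at len-1 and at -1 are both last-or-default
theorem pv_pyGetD_last {α : Type} (xs : List α) (d : α) :
    PySem.List.pyGetD xs (-1) d = (xs.getLast?).getD d := by
  cases xs with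
  | nil => simp [PySem.List.pyGetD, PySem.List.pyGet?]
  | cons x t =>
    rw [PySem.List.pyGetD_neg_one (x :: t) d (by simp),
        List.getLast?_eq_some_getLast (by simp)]
    rfl

theorem pv_pyGetD_len_sub_one {α : Type} (xs : List α) (d : α) :
    PySem.List.pyGetD xs (PySem.List.len xs - 1) d = (xs.getLast?).getD d := by
  cases xs with
  | nil => simp [PySem.List.pyGetD, PySem.List.pyGet?, PySem.List.len]
  | cons x t =>
    have h1 : PySem.List.len (x :: t) - 1 = (((x :: t).length - 1 : Nat) : Int) := by
      simp [PySem.List.len_eq]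
    rw [h1, PySem.List.pyGetD_natCast, List.getLast?_eq_getElem?]
    simp [List.getD]

theorem pv_value_eq (l : String) : pvGetValue l = pvLastTok l := by
  unfold pvGetValue pvLastTok
  rw [pv_pyGetD_last, pv_pyGetD_len_sub_one]

-- a last-match-wins overwrite loop is a backward search
theorem pv_foldl_update_eq_find?_reverse {α β : Type} (q : α → Bool) (g : α → β) :
    ∀ (l : List α) (v : β),
      l.foldl (fun v x => if q x then g x else v) v
        = (match l.reverse.find? q with | some x => g x | none => v) := by
  intro l
  induction l with
  | nil => intro v; rfl
  | cons x t ih =>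
    intro v
    simp only [List.foldl_cons, List.reverse_cons, List.find?_append, ih]
    cases h : t.reverse.find? q <;> simp [List.find?] <;> cases hq : q x <;> simp

-- A's match-path test equals B's guarded token test (for a nonempty keyword)
theorem pv_pred_eq (k : String) (hk : k ≠ "") (l : String) :
    (k == PySem.List.pyGetD (PySem.Str.split₀ l) 1 "") =
      (decide (1 < PySem.List.len (PySem.Str.split₀ l)) &&
        (PySem.List.pyGetD (PySem.Str.split₀ l) 1 "" == k)) := by
  rcases h : PySem.Str.split₀ l with _ | ⟨a, _ | ⟨b, r⟩⟩
  · simp [PySem.List.pyGetD, PySem.List.pyGet?, PySem.List.pyIdx?, PySem.List.len, hk]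
  · simp [PySem.List.pyGetD, PySem.List.pyGet?, PySem.List.pyIdx?, PySem.List.len, hk]
  · have h1 : PySem.List.pyGetD (a :: b :: r) (1 : Int) "" = b := by
      have e1 : ((1:Nat) : Int) = (1 : Int) := by norm_num
      rw [← e1, PySem.List.pyGetD_natCast]; rfl
    have hlen : decide (1 < PySem.List.len (a :: b :: r)) = true := by
      simp [PySem.List.len_eq]; try omega
    rw [h1, hlen]
    by_cases hb : k = b <;> simp [hb, eq_comm]

-- the CTRL value is never the empty string
theorem pv_lastTok_ne_empty (l : String) (h : PySem.Str.isIn "CTRL " l = true) :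
    pvLastTok l ≠ "" := by
  have hinf := (PySem.Str.isIn_iff_infix _ _).mp h
  have hC : 'C' ∈ l.toList := hinf.subset (by decide)
  have hC' : 'C' ∈ pvRstripNl l.toList := pv_mem_rstripNl _ _ hC (by decide)
  have hne : PySem.Chars.split₀ (pvRstripNl l.toList) ≠ [] :=
    pv_split₀_ne_nil _ 'C' hC' (by decide)
  unfold pvLastTok
  rw [pv_pyGetD_last]
  have htl : (String.ofList (pvRstripNl l.toList)).toList = pvRstripNl l.toList := by simp
  rw [PySem.Str.split₀, htl, List.getLast?_map]
  rcases hlast : (PySem.Chars.split₀ (pvRstripNl l.toList)).getLast? with _ | p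
  · exact absurd (List.getLast?_eq_none_iff.mp hlast) hne
  · have hmem : p ∈ PySem.Chars.split₀ (pvRstripNl l.toList) :=
      List.mem_of_getLast? hlast
    have hpne : p ≠ [] := pv_piece_ne_nil _ p hmem
    simp only [Option.map_some, Option.getD_some]
    intro hcon
    apply hpne
    have hcl : (String.ofList p).toList = ("" : String).toList := by rw [hcon]
    simpa using hcl

theorem pv_props_eq (cfg : List String) (k : String) :
    pvGetPeripheralProperties cfg k = cfg.filter (fun line => PySem.Str.isIn k line) := by
  unfold pvGetPeripheralProperties
  exact PySem.List.foldl_append_if_eq_filter _ _ _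

theorem pv_find?_filter {α : Type} (l : List α) (q p : α → Bool) :
    (l.filter q).find? p = l.find? (fun x => q x && p x) := by
  induction l with
  | nil => rfl
  | cons x t ih =>
    cases hq : q x
    · rw [List.filter_cons_of_neg (by simp [hq])]
      simp [List.find?, hq, ih]
    · rw [List.filter_cons_of_pos hq]
      cases hp : p x
      · simp [List.find?, hq, hp, ih]
      · simp [List.find?, hq, hp]

-- A's per-field values as backward searches of cfg with a conjoined predicate
theorem pv_size_eq (cfg : List String) (k name : String) :
    pvGetPropertyValue cfg k name false
      = (match cfg.reverse.find? (fun l => PySem.Str.isIn k l && PySem.Str.isIn name l) with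
         | some l => pvLastTok l | none => "") := by
  unfold pvGetPropertyValue
  rw [pv_props_eq]
  simp only [Bool.false_eq_true, if_false]
  rw [pv_foldl_update_eq_find?_reverse (fun l => PySem.Str.isIn name l) pvGetValue]
  rw [← List.filter_reverse, pv_find?_filter]
  cases h : cfg.reverse.find? (fun l => PySem.Str.isIn k l && PySem.Str.isIn name l) <;>
    simp [pv_value_eq]

theorem pv_match_eq (cfg : List String) (k : String) (hk : k ≠ "") :
    pvGetPropertyValue cfg k k true
      = (match cfg.reverse.find? (fun l => PySem.Str.isIn k l &&
            (decide (1 < PySem.List.len (PySem.Str.split₀ l)) &&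
              (PySem.List.pyGetD (PySem.Str.split₀ l) 1 "" == k))) with
         | some l => pvLastTok l | none => "") := by
  unfold pvGetPropertyValue
  rw [pv_props_eq]
  simp only [if_true]
  rw [pv_foldl_update_eq_find?_reverse (fun prop => k == PySem.List.pyGetD (PySem.Str.split₀ prop) 1 "") pvGetValue]
  rw [← List.filter_reverse, pv_find?_filter]
  have hq : (fun l => PySem.Str.isIn k l && (k == PySem.List.pyGetD (PySem.Str.split₀ l) 1 ""))
      = (fun l => PySem.Str.isIn k l &&
          (decide (1 < PySem.List.len (PySem.Str.split₀ l)) &&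
            (PySem.List.pyGetD (PySem.Str.split₀ l) 1 "" == k))) := by
    funext l; rw [pv_pred_eq k hk l]
  rw [hq]
  cases h : cfg.reverse.find? _ <;> simp [pv_value_eq]

-- setdefault lemmas
theorem pv_sd_get_self {κ ν : Type} [BEq κ] [LawfulBEq κ] (d : PySem.Dict κ ν) (k : κ) (v : ν) :
    (d.setdefault k v).get? k = some ((d.get? k).getD v) := by
  unfold PySem.Dict.setdefault
  by_cases h : d.contains k = true
  · rw [if_pos h]
    rw [PySem.Dict.contains_eq_isSome_get?] at h
    cases hg : d.get? k with
    | some w => simp [hg]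
    | none => rw [hg] at h; simp at h
  · rw [if_neg h]
    have hfn : d.items.find? (fun p => p.1 == k) = none := by
      rw [List.find?_eq_none]
      intro p hp hpk
      exact h (by unfold PySem.Dict.contains; exact List.any_eq_true.mpr ⟨p, hp, hpk⟩)
    unfold PySem.Dict.get?
    simp [List.find?_append, hfn, List.find?]

theorem pv_sd_get_ne {κ ν : Type} [BEq κ] [LawfulBEq κ] (d : PySem.Dict κ ν) {k k' : κ} (v : ν)
    (h : k' ≠ k) : (d.setdefault k v).get? k' = d.get? k' := by
  unfold PySem.Dict.setdefault
  by_cases hc : d.contains k = true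
  · rw [if_pos hc]
  · rw [if_neg hc]
    have hkk : (k == k') = false := by
      rw [beq_eq_false_iff_ne]; exact Ne.symm h
    unfold PySem.Dict.get?
    simp [List.find?_append, List.find?, hkk]

-- get? through pvStepK: other keywords untouched
theorem pv_stepK_get_ne (line : String) (toks : List String)
    (d : PySem.Dict (String × String) String) (k : String) (K : String × String)
    (h : K.1 ≠ k) : (pvStepK line toks d k).get? K = d.get? K := by
  unfold pvStepK
  have hne : ∀ f : String, K ≠ (k, f) := by
    intro f hKf; exact h (by rw [hKf])
  split_ifs <;> simp [pv_sd_get_ne _ _ (hne _)]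

-- get? through pvStepK at each of the three slots of its own keyword
theorem pv_stepK_get_size (line : String) (toks : List String)
    (d : PySem.Dict (String × String) String) (k : String) :
    (pvStepK line toks d k).get? (k, "size")
      = (if PySem.Str.isIn k line && PySem.Str.isIn "SIZE " line then
          some ((d.get? (k, "size")).getD (PySem.List.pyGetD toks (-1) "")) else d.get? (k, "size")) := by
  unfold pvStepK
  have g1 : ∀ (d : PySem.Dict (String × String) String) v,
      (d.setdefault (k, "ctrl") v).get? (k, "size") = d.get? (k, "size") :=
    fun d v => pv_sd_get_ne d v (by simp)
  have g2 : ∀ (d : PySem.Dict (String × String) String) v,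
      (d.setdefault (k, "fallback") v).get? (k, "size") = d.get? (k, "size") :=
    fun d v => pv_sd_get_ne d v (by simp)
  cases hkl : PySem.Str.isIn k line <;>
    cases hsz : PySem.Str.isIn "SIZE " line <;>
      cases hct : PySem.Str.isIn "CTRL " line <;>
        cases hfb : (decide (1 < PySem.List.len toks) && (PySem.List.pyGetD toks 1 "" == k)) <;>
          simp [hkl, hsz, hct, hfb, g1, g2, pv_sd_get_self]

theorem pv_stepK_get_ctrl (line : String) (toks : List String)
    (d : PySem.Dict (String × String) String) (k : String) :
    (pvStepK line toks d k).get? (k, "ctrl")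
      = (if PySem.Str.isIn k line && PySem.Str.isIn "CTRL " line then
          some ((d.get? (k, "ctrl")).getD (PySem.List.pyGetD toks (-1) "")) else d.get? (k, "ctrl")) := by
  unfold pvStepK
  have g1 : ∀ (d : PySem.Dict (String × String) String) v,
      (d.setdefault (k, "size") v).get? (k, "ctrl") = d.get? (k, "ctrl") :=
    fun d v => pv_sd_get_ne d v (by simp)
  have g2 : ∀ (d : PySem.Dict (String × String) String) v,
      (d.setdefault (k, "fallback") v).get? (k, "ctrl") = d.get? (k, "ctrl") :=
    fun d v => pv_sd_get_ne d v (by simp)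
  cases hkl : PySem.Str.isIn k line <;>
    cases hsz : PySem.Str.isIn "SIZE " line <;>
      cases hct : PySem.Str.isIn "CTRL " line <;>
        cases hfb : (decide (1 < PySem.List.len toks) && (PySem.List.pyGetD toks 1 "" == k)) <;>
          simp [hkl, hsz, hct, hfb, g1, g2, pv_sd_get_self]

theorem pv_stepK_get_fb (line : String) (toks : List String)
    (d : PySem.Dict (String × String) String) (k : String) :
    (pvStepK line toks d k).get? (k, "fallback")
      = (if PySem.Str.isIn k line &&
            (decide (1 < PySem.List.len toks) && (PySem.List.pyGetD toks 1 "" == k)) then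
          some ((d.get? (k, "fallback")).getD (PySem.List.pyGetD toks (-1) "")) else d.get? (k, "fallback")) := by
  unfold pvStepK
  have g1 : ∀ (d : PySem.Dict (String × String) String) v,
      (d.setdefault (k, "size") v).get? (k, "fallback") = d.get? (k, "fallback") :=
    fun d v => pv_sd_get_ne d v (by simp)
  have g2 : ∀ (d : PySem.Dict (String × String) String) v,
      (d.setdefault (k, "ctrl") v).get? (k, "fallback") = d.get? (k, "fallback") :=
    fun d v => pv_sd_get_ne d v (by simp)
  cases hkl : PySem.Str.isIn k line <;>
    cases hsz : PySem.Str.isIn "SIZE " line <;>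
      cases hct : PySem.Str.isIn "CTRL " line <;>
        cases hfb : (decide (1 < PySem.List.len toks) && (PySem.List.pyGetD toks 1 "" == k)) <;>
          simp [hkl, hsz, hct, hfb, g1, g2, pv_sd_get_self]

-- fold invariant: after the whole backward pass, each slot holds the FIRST line (in traversal order)
-- satisfying its predicate, mapped to its last token — unless the slot was already filled.
theorem pv_fold_get (K : String × String) (p : String → Bool)
    (hstep : ∀ (line : String) (d : PySem.Dict (String × String) String),
      (pvStep d line).get? K
        = (if p line then some ((d.get? K).getD (pvLastTok line)) else d.get? K)) :
    ∀ (lines : List String) (d : PySem.Dict (String × String) String),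
      (lines.foldl pvStep d).get? K
        = (match d.get? K with
           | some v => some v
           | none => (lines.find? p).map pvLastTok) := by
  intro lines
  induction lines with
  | nil => intro d; cases h : d.get? K <;> simp [h]
  | cons x t ih =>
    intro d
    rw [List.foldl_cons, ih, hstep]
    by_cases hp : p x = true
    · rw [if_pos hp]
      cases h : d.get? K <;> simp [List.find?, hp]
    · rw [if_neg hp]
      cases h : d.get? K <;> simp [List.find?, hp]

-- the step lemmas instantiated for each keyword/field
theorem pv_step_get (line : String) (d : PySem.Dict (String × String) String)
    (k : String) (hk : k ∈ (["SYSTEM_DDR_BMB", "RAM_A"] : List String)) (f : String)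
    (p : String → Bool)
    (hp : p = fun l =>
      PySem.Str.isIn k l &&
        (if f = "size" then PySem.Str.isIn "SIZE " l
         else if f = "ctrl" then PySem.Str.isIn "CTRL " l
         else decide (1 < PySem.List.len (PySem.Str.split₀ l)) &&
           (PySem.List.pyGetD (PySem.Str.split₀ l) 1 "" == k)))
    (hf : f = "size" ∨ f = "ctrl" ∨ f = "fallback") :
    (pvStep d line).get? (k, f)
      = (if p line then some ((d.get? (k, f)).getD (pvLastTok line)) else d.get? (k, f)) := by
  have htoks : PySem.Str.split₀ (String.ofList (pvRstripNl line.toList)) = PySem.Str.split₀ line :=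
    pv_str_split_rstrip line
  have hlt : pvLastTok line
      = PySem.List.pyGetD (PySem.Str.split₀ (String.ofList (pvRstripNl line.toList))) (-1) "" := rfl
  simp only [List.mem_cons, List.not_mem_nil, or_false] at hk
  unfold pvStep
  simp only [List.foldl_cons, List.foldl_nil, hp, hlt]
  rcases hk with rfl | rfl <;> rcases hf with rfl | rfl | rfl
  · rw [pv_stepK_get_ne _ _ _ _ _ (by simp), pv_stepK_get_size]
    simp [htoks]
  · rw [pv_stepK_get_ne _ _ _ _ _ (by simp), pv_stepK_get_ctrl]
    simp [htoks]
  · rw [pv_stepK_get_ne _ _ _ _ _ (by simp), pv_stepK_get_fb]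
    simp [htoks]
  · rw [pv_stepK_get_size, pv_stepK_get_ne _ _ _ _ _ (by simp)]
    simp [htoks]
  · rw [pv_stepK_get_ctrl, pv_stepK_get_ne _ _ _ _ _ (by simp)]
    simp [htoks]
  · rw [pv_stepK_get_fb, pv_stepK_get_ne _ _ _ _ _ (by simp)]
    simp [htoks]

-- found.get? (k, f) after the whole pass = first matching line of reversed cfg
theorem pv_found_get (cfg : List String) (k : String)
    (hk : k ∈ (["SYSTEM_DDR_BMB", "RAM_A"] : List String)) (f : String)
    (hf : f = "size" ∨ f = "ctrl" ∨ f = "fallback") :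
    (cfg.reverse.foldl pvStep PySem.Dict.empty).get? (k, f)
      = (cfg.reverse.find? (fun l =>
          PySem.Str.isIn k l &&
            (if f = "size" then PySem.Str.isIn "SIZE " l
             else if f = "ctrl" then PySem.Str.isIn "CTRL " l
             else decide (1 < PySem.List.len (PySem.Str.split₀ l)) &&
               (PySem.List.pyGetD (PySem.Str.split₀ l) 1 "" == k)))).map pvLastTok := by
  rw [pv_fold_get (k, f) _ (fun line d => pv_step_get line d k hk f _ rfl hf) cfg.reverse PySem.Dict.empty]
  simp [PySem.Dict.get?_empty]

-- one keyword's (size, addr) agreement, then assembly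
theorem pv_keyword_eq (cfg : List String) (k : String)
    (hk : k ∈ (["SYSTEM_DDR_BMB", "RAM_A"] : List String)) (hkne : k ≠ "") :
    pvGetPropertyValue cfg k "SIZE " false
        = (cfg.reverse.foldl pvStep PySem.Dict.empty).getD (k, "size") ""
    ∧ (if pvGetPropertyValue cfg k "CTRL " false == "" then pvGetPropertyValue cfg k k true
        else pvGetPropertyValue cfg k "CTRL " false)
        = (cfg.reverse.foldl pvStep PySem.Dict.empty).getD (k, "ctrl")
            ((cfg.reverse.foldl pvStep PySem.Dict.empty).getD (k, "fallback") "") := by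
  have hsize := pv_found_get cfg k hk "size" (Or.inl rfl)
  have hctrl := pv_found_get cfg k hk "ctrl" (Or.inr (Or.inl rfl))
  have hfb := pv_found_get cfg k hk "fallback" (Or.inr (Or.inr rfl))
  simp only [String.reduceEq, reduceIte] at hsize hctrl hfb
  constructor
  · rw [pv_size_eq cfg k "SIZE ", PySem.Dict.getD_eq_get?_getD, hsize]
    cases h : cfg.reverse.find? (fun l => PySem.Str.isIn k l && PySem.Str.isIn "SIZE " l) <;>
      simp only [Option.map_none, Option.map_some, Option.getD_none, Option.getD_some]
  · rw [pv_size_eq cfg k "CTRL ", PySem.Dict.getD_eq_get?_getD, PySem.Dict.getD_eq_get?_getD,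
      hctrl, hfb]
    cases h : cfg.reverse.find? (fun l => PySem.Str.isIn k l && PySem.Str.isIn "CTRL " l) with
    | some l =>
      have hl : PySem.Str.isIn "CTRL " l = true := by
        have h2 := List.find?_some h
        simp only [Bool.and_eq_true] at h2
        exact h2.2
      have hne : pvLastTok l ≠ "" := pv_lastTok_ne_empty l hl
      simp only [Option.map_some, Option.getD_some]
      rw [if_neg (by simpa using hne)]
    | none =>
      simp only [Option.map_none, Option.getD_none]
      rw [if_pos (by simp), pv_match_eq cfg k hkne]
      cases h2 : cfg.reverse.find? (fun l => PySem.Str.isIn k l &&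
          (decide (1 < PySem.List.len (PySem.Str.split₀ l)) &&
            (PySem.List.pyGetD (PySem.Str.split₀ l) 1 "" == k))) <;>
        simp only [Option.map_none, Option.map_some, Option.getD_none, Option.getD_some]

-- ===== VERDICT (by name: the statement is the Claim_ definition above) =====
theorem get_memory_config_spec : Claim_equal_get_memory_config := by
  unfold Claim_equal_get_memory_config
  intro cfg _ _
  unfold Spec_get_memory_config get_memory_config get_memory_config_alt
  have he : PySem.List.enumerate ["SYSTEM_DDR_BMB", "RAM_A"] = [((0:Int), "SYSTEM_DDR_BMB"), (1, "RAM_A")] := by decide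
  have e0 : PySem.List.pyGetD ["external_memory", "internal_memory"] (0:Int) "" = "external_memory" := by decide
  have e1 : PySem.List.pyGetD ["external_memory", "internal_memory"] (1:Int) "" = "internal_memory" := by decide
  obtain ⟨hs1, ha1⟩ := pv_keyword_eq cfg "SYSTEM_DDR_BMB" (by decide) (by decide)
  obtain ⟨hs2, ha2⟩ := pv_keyword_eq cfg "RAM_A" (by decide) (by decide)
  simp only [he, List.foldl_cons, List.foldl_nil, List.zip, List.zipWith, List.map, e0, e1,
    List.nil_append, hs1, ha1, hs2, ha2]
  rfl
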